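-- pv_equiv track=rewrite | github.com/D33333/Projet_theorie_des_codes | code_reed_solomon_v4.0.py | lire_decouper_livre
-- ===== SOURCE A (Python) =====
-- def lire_decouper_livre(livre):
--     """D
--         Entrée : livre (string)
--         Sortie : liste de string
--     """
--     blocs = []
--     chaine = ""
--     compteur_phrases = 0
--     for char in livre:
--         if char == '.':
--             if (compteur_phrases == 3):
--                 compteur_phrases = 0
--                 blocs.append(chaine)
--                 chaine = ""
--             else :
--                 compteur_phrases += 1
--         chaine += char
--     blocs.append(chaine) #dernier bloc ne terminant pas par un point
--     return blocs
-- ===== SOURCE B (Python) =====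
-- def lire_decouper_livre(livre):
--     idx = [i for i, ch in enumerate(livre) if ch == '.']
--     bounds = [p for k, p in enumerate(idx) if k % 4 == 3]
--     blocs = []
--     prev = 0
--     for b in bounds:
--         blocs.append(livre[prev:b])
--         prev = b
--     blocs.append(livre[prev:])
--     return blocs
-- ===== Notes on version B (the rewrite author's own statement) =====
-- stated objective: alternative
-- what changed: Replaces the char-by-char accumulator-and-counter scan with an index-based method: collect the positions of every period, take every 4th one (starting at the 4th) as a block boundary, and emit slices of the string between consecutive boundaries.
import Mathlib
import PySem

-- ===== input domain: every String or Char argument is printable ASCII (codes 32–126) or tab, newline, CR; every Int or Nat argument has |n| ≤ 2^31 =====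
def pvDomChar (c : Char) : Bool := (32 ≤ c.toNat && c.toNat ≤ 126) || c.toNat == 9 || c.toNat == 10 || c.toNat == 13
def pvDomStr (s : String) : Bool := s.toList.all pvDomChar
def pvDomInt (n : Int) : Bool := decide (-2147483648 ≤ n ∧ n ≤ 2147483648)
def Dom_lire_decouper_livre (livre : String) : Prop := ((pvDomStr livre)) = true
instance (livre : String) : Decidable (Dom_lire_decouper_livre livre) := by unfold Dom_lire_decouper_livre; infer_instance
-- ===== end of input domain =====

-- B replaces A's char-by-char counter/accumulator scan by an index-based method (collect '.' positions,
-- take every 4th as a boundary, slice between boundaries); objective: alternative algorithm, same cost.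

-- ===== PORT A =====
-- A's loop body; 'chaine' (a Python string built by 'chaine += char') is carried as List Char,
-- turned into a String exactly where A's code appends it to 'blocs'.
def pvAStep (st : List String × List Char × Int) (ch : Char) : List String × List Char × Int :=
  if ch = '.' then
    (if st.2.2 = 3 then (st.1 ++ [String.ofList st.2.1], [ch], 0)
     else (st.1, st.2.1 ++ [ch], st.2.2 + 1))
  else (st.1, st.2.1 ++ [ch], st.2.2)

def lire_decouper_livre (livre : String) : List String :=
  (livre.toList.foldl pvAStep ([], [], 0)).1
    ++ [String.ofList (livre.toList.foldl pvAStep ([], [], 0)).2.1]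

-- ===== PORT B =====
-- Source B's locals 'idx' and 'bounds', kept as helpers
def pvBIdx (livre : String) : List Int :=
  ((PySem.List.enumerate livre.toList 0).filter (fun p => p.2 == '.')).map (fun p => p.1)

def pvBBounds (idx : List Int) : List Int :=
  ((PySem.List.enumerate idx 0).filter (fun q => PySem.Int.mod q.1 4 == 3)).map (fun q => q.2)

def lire_decouper_livre_alt (livre : String) : List String :=
  ((pvBBounds (pvBIdx livre)).foldl
      (fun (st : List String × Int) b => (st.1 ++ [PySem.Str.slice livre (some st.2) (some b)], b))
      (([] : List String), (0 : Int))).1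
    ++ [PySem.Str.slice livre
        (some ((pvBBounds (pvBIdx livre)).foldl
          (fun (st : List String × Int) b => (st.1 ++ [PySem.Str.slice livre (some st.2) (some b)], b))
          (([] : List String), (0 : Int))).2) none]

-- ===== PRECONDITION & SPEC =====
def Spec_lire_decouper_livre (livre : String) (out : List String) : Prop := out = lire_decouper_livre_alt livre
instance (livre : String) (out : List String) : Decidable (Spec_lire_decouper_livre livre out) := by unfold Spec_lire_decouper_livre; infer_instance

-- ===== CLAIM (what is proved, stated in full; the proofs are below) =====
def Claim_equal_lire_decouper_livre : Prop := ∀ (livre : String), Dom_lire_decouper_livre livre → Spec_lire_decouper_livre livre (lire_decouper_livre livre)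

-- ===== LEMMAS AND PROOFS =====

-- prepend one char to the first block (creating it if absent)
def consHead (x : Char) : List (List Char) → List (List Char)
  | [] => [[x]]
  | h :: t => (x :: h) :: t

-- prepend a prefix to the first block (creating it if absent)
def appHead (a : List Char) : List (List Char) → List (List Char)
  | [] => [a]
  | h :: t => (a ++ h) :: t

-- the blocks of the remaining text given the current period counter (A's semantics, accumulator-free)
def blocksL : Nat → List Char → List (List Char)
  | _, [] => [[]]
  | c, ch :: rest =>
    if ch = '.' then
      (if c = 3 then [] :: consHead '.' (blocksL 0 rest)
       else consHead ch (blocksL (c + 1) rest))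
    else consHead ch (blocksL c rest)

-- skip n elements, then take every 4th (what B's 'k % 4 == 3' filter computes)
def pickN {α : Type} : Nat → List α → List α
  | _, [] => []
  | 0, x :: xs => x :: pickN 3 xs
  | n + 1, _ :: xs => pickN n xs

-- positions of '.' in a char list
def dotIdx : List Char → List Nat
  | [] => []
  | c :: t => if c = '.' then 0 :: (dotIdx t).map (· + 1) else (dotIdx t).map (· + 1)

-- B's slicing loop, on char lists with Nat bounds
def sliceLoop (s : List Char) (prev : Nat) : List Nat → List (List Char)
  | [] => [s.drop prev]
  | b :: bs => ((s.drop prev).take (b - prev)) :: sliceLoop s b bs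

theorem consHead_ne_nil (x : Char) (l : List (List Char)) : consHead x l ≠ [] := by
  cases l <;> simp [consHead]

theorem blocksL_ne_nil (c : Nat) (s : List Char) : blocksL c s ≠ [] := by
  cases s with
  | nil => simp [blocksL]
  | cons ch rest =>
    simp only [blocksL]
    split_ifs with h1 h2
    · simp
    · exact consHead_ne_nil _ _
    · exact consHead_ne_nil _ _

theorem appHead_consHead (a : List Char) (x : Char) (l : List (List Char)) :
    appHead a (consHead x l) = appHead (a ++ [x]) l := by
  cases l <;> simp [appHead, consHead]

theorem appHead_single (x : Char) (l : List (List Char)) : appHead [x] l = consHead x l := by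
  cases l <;> simp [appHead, consHead]

theorem appHead_nil (l : List (List Char)) (h : l ≠ []) : appHead [] l = l := by
  cases l with
  | nil => exact absurd rfl h
  | cons h t => simp [appHead]

theorem pickN_map {α β : Type} (f : α → β) : ∀ (n : Nat) (l : List α),
    pickN n (l.map f) = (pickN n l).map f := by
  intro n l
  induction l generalizing n with
  | nil => simp [pickN]
  | cons x xs ih =>
    cases n with
    | zero => simp [pickN, ih]
    | succ m => simp [pickN, ih]

-- A's fold equals blocksL with the pending chain prepended
theorem Ainv : ∀ (s : List Char) (blocs : List String) (chaine : List Char) (c : Nat), c ≤ 3 →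
    (s.foldl pvAStep (blocs, chaine, (c : Int))).1 ++
      [String.ofList (s.foldl pvAStep (blocs, chaine, (c : Int))).2.1]
    = blocs ++ (appHead chaine (blocksL c s)).map String.ofList := by
  intro s
  induction s with
  | nil =>
    intro blocs chaine c _
    simp [blocksL, appHead]
  | cons ch rest ih =>
    intro blocs chaine c hc
    by_cases hch : ch = '.'
    · subst hch
      by_cases h3 : c = 3
      · have hci : ((c : Int) = 3) := by exact_mod_cast congrArg (Nat.cast) h3
        have hstep : pvAStep (blocs, chaine, (c : Int)) '.'
            = (blocs ++ [String.ofList chaine], ['.'], 0) := by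
          simp [pvAStep, hci]
        have ih0 := ih (blocs ++ [String.ofList chaine]) ['.'] 0 (by omega)
        simp only [Nat.cast_zero] at ih0
        rw [List.foldl_cons, hstep, ih0, blocksL]
        simp only [if_pos h3, appHead_single, if_true]
        cases hb : blocksL 0 rest with
        | nil => exact absurd hb (blocksL_ne_nil 0 rest)
        | cons b bs => simp [consHead, appHead]
      · have hci : ¬((c : Int) = 3) := by
          intro h; exact h3 (by exact_mod_cast h)
        have hstep : pvAStep (blocs, chaine, (c : Int)) '.'
            = (blocs, chaine ++ ['.'], (c : Int) + 1) := by
          simp [pvAStep, hci]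
        have ih1 := ih blocs (chaine ++ ['.']) (c + 1) (by omega)
        push_cast at ih1
        rw [List.foldl_cons, hstep, ih1, blocksL]
        simp [h3, appHead_consHead]
    · have hstep : pvAStep (blocs, chaine, (c : Int)) ch
          = (blocs, chaine ++ [ch], (c : Int)) := by
        simp [pvAStep, hch]
      have ih1 := ih blocs (chaine ++ [ch]) c hc
      rw [List.foldl_cons, hstep, ih1, blocksL]
      simp [hch, appHead_consHead]

-- B's first comprehension computes the '.' positions
theorem Bidx : ∀ (s : List Char) (k : Nat),
    ((PySem.List.enumerate s (k : Int)).filter (fun p => p.2 == '.')).map (fun p => p.1)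
    = (dotIdx s).map (fun n => ((k + n : Nat) : Int)) := by
  intro s
  induction s with
  | nil => intro k; simp [PySem.List.enumerate, dotIdx]
  | cons ch rest ih =>
    intro k
    rw [PySem.List.enumerate_cons]
    by_cases hch : ch = '.'
    · subst hch
      have hrec := ih (k + 1)
      have hk : ((k : Int) + 1) = ((k + 1 : Nat) : Int) := by push_cast; ring
      rw [← hk] at hrec
      simp [dotIdx, hrec, List.map_map]
      intro a _
      ring
    · have hk : ((k : Int) + 1) = ((k + 1 : Nat) : Int) := by push_cast; ring
      simp only [List.filter_cons, dotIdx, if_neg hch]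
      have hb : (ch == '.') = false := by simpa using hch
      rw [hb]
      simp only [Bool.false_eq_true, if_false]
      rw [hk, ih (k + 1)]
      simp only [List.map_map]
      exact List.map_congr_left (fun n _ => by simp; ring)

-- B's second comprehension (k % 4 == 3) is pickN
theorem Bbounds : ∀ (l : List Int) (k n : Nat), n ≤ 3 → (k + n) % 4 = 3 →
    ((PySem.List.enumerate l (k : Int)).filter (fun q => PySem.Int.mod q.1 4 == 3)).map (fun q => q.2)
    = pickN n l := by
  intro l
  induction l with
  | nil => intro k n _ _; simp [PySem.List.enumerate, pickN]
  | cons x xs ih =>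
    intro k n hn h4
    rw [PySem.List.enumerate_cons, List.filter_cons]
    have hmod : PySem.Int.mod (k : Int) 4 = ((k % 4 : Nat) : Int) := by
      exact_mod_cast PySem.Int.mod_natCast k 4
    have hk : ((k : Int) + 1) = ((k + 1 : Nat) : Int) := by push_cast; ring
    rw [hk]
    cases n with
    | zero =>
      have hk3 : k % 4 = 3 := by omega
      have hcond : ((PySem.Int.mod ((k : Nat) : Int) 4 == 3) = true) := by
        rw [hmod, hk3]; decide
      rw [if_pos hcond]
      simp only [List.map_cons]
      rw [ih (k + 1) 3 (by omega) (by omega)]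
      rfl
    | succ m =>
      have hk3 : ¬(k % 4 = 3) := by omega
      have hcond : ((PySem.Int.mod ((k : Nat) : Int) 4 == 3) = false) := by
        rw [hmod]
        simp only [beq_eq_false_iff_ne, ne_eq]
        intro hcontr
        exact hk3 (by exact_mod_cast hcontr)
      rw [hcond]
      simp only [Bool.false_eq_true, if_false]
      rw [ih (k + 1) m (by omega) (by omega)]
      rfl

-- B's slicing loop, lifted to char lists
theorem Bloop (livre : String) : ∀ (bs : List Nat) (blocs : List String) (prev : Nat),
    ((bs.map (Nat.cast : Nat → Int)).foldl
        (fun (st : List String × Int) b => (st.1 ++ [PySem.Str.slice livre (some st.2) (some b)], b))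
        (blocs, (prev : Int))).1 ++
      [PySem.Str.slice livre
        (some ((bs.map (Nat.cast : Nat → Int)).foldl
          (fun (st : List String × Int) b => (st.1 ++ [PySem.Str.slice livre (some st.2) (some b)], b))
          (blocs, (prev : Int))).2) none]
    = blocs ++ (sliceLoop livre.toList prev bs).map String.ofList := by
  have hslice : ∀ (a b : Nat), PySem.Str.slice livre (some (a : Int)) (some (b : Int))
      = String.ofList ((livre.toList.drop a).take (b - a)) := by
    intro a b
    apply String.toList_inj.mp
    rw [PySem.Str.toList_slice, PySem.Chars.slice_eq_listSlice, PySem.List.slice_natCast]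
    simp
  have htail : ∀ (a : Nat), PySem.Str.slice livre (some (a : Int)) none
      = String.ofList (livre.toList.drop a) := by
    intro a
    apply String.toList_inj.mp
    rw [PySem.Str.toList_slice, PySem.Chars.slice_eq_listSlice, PySem.List.slice_from_natCast]
    simp
  intro bs
  induction bs with
  | nil => intro blocs prev; simp [sliceLoop, htail prev]
  | cons b bs ih =>
    intro blocs prev
    rw [List.map_cons, List.foldl_cons]
    rw [ih (blocs ++ [PySem.Str.slice livre (some (prev : Int)) (some (b : Int))]) b]
    rw [hslice prev b]
    simp [sliceLoop]

-- the central invariant: slicing at every 4th remaining period equals counter-scanning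
theorem central : ∀ (s : List Char) (c prev : Nat) (P : List Char), c ≤ 3 → prev ≤ P.length →
    sliceLoop (P ++ s) prev ((pickN (3 - c) (dotIdx s)).map (· + P.length))
    = appHead (P.drop prev) (blocksL c s) := by
  intro s
  induction s with
  | nil =>
    intro c prev P _ _
    simp [dotIdx, pickN, sliceLoop, blocksL, appHead]
  | cons ch rest ih =>
    intro c prev P hc hprev
    have happ : P ++ ch :: rest = (P ++ [ch]) ++ rest := by simp
    have hdropP : ∀ (l : List Char), (P ++ ch :: l).drop prev = P.drop prev ++ ch :: l :=
      fun l => List.drop_append_of_le_length hprev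
    by_cases hch : ch = '.'
    · subst hch
      by_cases h3 : c = 3
      · subst h3
        have hdot : dotIdx ('.' :: rest) = 0 :: (dotIdx rest).map (· + 1) := by simp [dotIdx]
        rw [hdot]
        simp only [pickN, pickN_map, List.map_cons, List.map_map, Nat.zero_add, sliceLoop]
        have hmap : ((pickN 3 (dotIdx rest)).map ((· + P.length) ∘ (· + 1)))
            = (pickN 3 (dotIdx rest)).map (· + (P ++ ['.']).length) := by
          apply List.map_congr_left
          intro a _
          simp
          omega
        have ih0 := ih 0 P.length (P ++ ['.']) (by omega) (by simp)
        simp only [Nat.sub_zero] at ih0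
        have hdropD : (P ++ ['.']).drop P.length = ['.'] := List.drop_left
        rw [hmap, happ, ih0, hdropD, appHead_single]
        have hfst : (((P ++ '.' :: rest).drop prev).take (P.length - prev)) = P.drop prev := by
          rw [hdropP rest]
          have hl : (P.drop prev).length = P.length - prev := by simp
          exact hl ▸ List.take_left
        rw [← happ, hfst, blocksL]
        simp [appHead]
      · have hsub : 3 - c = (3 - (c + 1)) + 1 := by omega
        have hdot : dotIdx ('.' :: rest) = 0 :: (dotIdx rest).map (· + 1) := by simp [dotIdx]
        rw [hdot, hsub]
        simp only [pickN, pickN_map, List.map_map]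
        have hmap : ((pickN (3 - (c + 1)) (dotIdx rest)).map ((· + P.length) ∘ (· + 1)))
            = (pickN (3 - (c + 1)) (dotIdx rest)).map (· + (P ++ ['.']).length) := by
          apply List.map_congr_left
          intro a _
          simp
          omega
        have ih1 := ih (c + 1) prev (P ++ ['.']) (by omega) (by simp; omega)
        rw [hmap, happ, ih1, blocksL]
        have hdropD : (P ++ ['.']).drop prev = P.drop prev ++ ['.'] :=
          List.drop_append_of_le_length hprev
        rw [hdropD]
        simp [h3, appHead_consHead]
    · have hdot : dotIdx (ch :: rest) = (dotIdx rest).map (· + 1) := by simp [dotIdx, hch]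
      rw [hdot]
      simp only [pickN_map, List.map_map]
      have hmap : ((pickN (3 - c) (dotIdx rest)).map ((· + P.length) ∘ (· + 1)))
          = (pickN (3 - c) (dotIdx rest)).map (· + (P ++ [ch]).length) := by
        apply List.map_congr_left
        intro a _
        simp
        omega
      have ih1 := ih c prev (P ++ [ch]) hc (by simp; omega)
      rw [hmap, happ, ih1, blocksL]
      have hdropD : (P ++ [ch]).drop prev = P.drop prev ++ [ch] :=
        List.drop_append_of_le_length hprev
      rw [hdropD]
      simp [hch, appHead_consHead]

theorem mainL (s : List Char) : sliceLoop s 0 (pickN 3 (dotIdx s)) = blocksL 0 s := by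
  have h := central s 0 0 [] (by omega) (by simp)
  simpa [appHead_nil _ (blocksL_ne_nil 0 s), List.map_id'] using h

-- ===== VERDICT (by name: the statement is the Claim_ definition above) =====
theorem lire_decouper_livre_spec : Claim_equal_lire_decouper_livre := by
  intro livre _
  unfold Spec_lire_decouper_livre
  have hA : lire_decouper_livre livre = (blocksL 0 livre.toList).map String.ofList := by
    unfold lire_decouper_livre
    have h := Ainv livre.toList [] [] 0 (by omega)
    simp only [Nat.cast_zero] at h
    rw [h, appHead_nil _ (blocksL_ne_nil 0 livre.toList)]
    simp
  have hB : lire_decouper_livre_alt livre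
      = (sliceLoop livre.toList 0 (pickN 3 (dotIdx livre.toList))).map String.ofList := by
    unfold lire_decouper_livre_alt pvBBounds pvBIdx
    have hidx0 := Bidx livre.toList 0
    simp only [Nat.cast_zero, Nat.zero_add] at hidx0
    have hidx : ((PySem.List.enumerate livre.toList 0).filter (fun p => p.2 == '.')).map (fun p => p.1)
        = (dotIdx livre.toList).map (Nat.cast : Nat → Int) := hidx0
    rw [hidx]
    have hbnd := Bbounds ((dotIdx livre.toList).map (Nat.cast : Nat → Int)) 0 3 (by omega) (by omega)
    simp only [Nat.cast_zero] at hbnd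
    rw [pickN_map] at hbnd
    rw [hbnd]
    have hloop := Bloop livre (pickN 3 (dotIdx livre.toList)) [] 0
    simp only [Nat.cast_zero] at hloop
    rw [hloop]
    simp
  rw [hA, hB, mainL]
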